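-- pv_equiv track=rewrite | github.com/haolunc/ARC-RL | reference_solutions/solutions/97999447.py | transform
-- ===== SOURCE A (Python) =====
-- def transform(grid):
--
--     out = [row[:] for row in grid]
--
--     for r_idx, row in enumerate(out):
--         start_col = None
--         colour = None
--
--         for c_idx, val in enumerate(row):
--             if val != 0:
--                 start_col = c_idx
--                 colour = val
--                 break
--
--         if start_col is not None:
--             for j in range(start_col, len(row)):
--                 out[r_idx][j] = colour if (j - start_col) % 2 == 0 else 5
--
--     return out
-- ===== SOURCE B (Python) =====
-- def transform(grid):
--     result = []
--     for row in grid: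
--         new_row = []
--         started = False
--         colour = 0
--         next_is_five = False
--         for val in row:
--             if not started:
--                 if val == 0:
--                     new_row.append(val)
--                 else:
--                     started = True
--                     colour = val
--                     next_is_five = True
--                     new_row.append(val)
--             else:
--                 new_row.append(5 if next_is_five else colour)
--                 next_is_five = not next_is_five
--         result.append(new_row)
--     return result
-- ===== Notes on version B (the rewrite author's own statement) =====
-- stated objective: alternative
-- what changed: Replaces A's two-phase per-row logic (scan for first nonzero, then an index-arithmetic fill over range(start,len) with (j-start)%2) by a single linear state-machine pass per row that carries started/colour/next_is_five flags and builds each output row front to back without any index arithmetic or in-place assignment.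
import Mathlib
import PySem

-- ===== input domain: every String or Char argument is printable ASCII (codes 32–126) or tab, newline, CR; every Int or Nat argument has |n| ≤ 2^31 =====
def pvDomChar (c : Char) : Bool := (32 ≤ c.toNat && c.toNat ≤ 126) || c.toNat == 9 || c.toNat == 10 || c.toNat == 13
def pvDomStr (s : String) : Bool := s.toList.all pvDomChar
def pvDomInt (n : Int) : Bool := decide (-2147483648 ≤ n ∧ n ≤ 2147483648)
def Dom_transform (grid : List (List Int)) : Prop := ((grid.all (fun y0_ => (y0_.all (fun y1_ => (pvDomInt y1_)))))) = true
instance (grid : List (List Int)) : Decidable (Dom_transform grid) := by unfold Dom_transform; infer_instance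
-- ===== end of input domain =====

-- B replaces A's two-phase per-row logic (find first nonzero, then index-arithmetic
-- fill over range(start,len)) by a single state-machine pass building each row front
-- to back; objective: alternative (same cost, no index arithmetic or in-place sets).

-- ===== PORT A =====
-- inner 'for c_idx, val in enumerate(row): if val != 0: … break'
def findNZ : List Int → Nat → Option (Nat × Int)
  | [], _ => none
  | v :: rest, i => if v ≠ 0 then some (i, v) else findNZ rest (i + 1)

-- 'for j in range(start_col, len(row)): out[r_idx][j] = …'; every j is a valid
-- nonnegative index here, so Python's assignment is List.set at j.toNat (exact).
def fillRowA (row : List Int) (s : Nat) (c : Int) : List Int :=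
  (PySem.List.pyRange (s : Int) (row.length : Int) 1).foldl
    (fun acc j => acc.set j.toNat (if PySem.Int.mod (j - (s : Int)) 2 == 0 then c else 5)) row

def transform (grid : List (List Int)) : List (List Int) :=
  grid.map (fun row =>
    match findNZ row 0 with
    | none => row
    | some (s, c) => fillRowA row s c)

-- ===== PORT B =====
-- the 'started' phase of Source B's loop: carries colour and the next_is_five flag
def fillAlt : List Int → Int → Bool → List Int
  | [], _, _ => []
  | _ :: rest, c, five => (if five then 5 else c) :: fillAlt rest c (!five)

-- the not-yet-started phase: copy zeros, switch state at the first nonzero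
def rowAlt : List Int → List Int
  | [] => []
  | v :: rest => if v == 0 then v :: rowAlt rest else v :: fillAlt rest v true

def transform_alt (grid : List (List Int)) : List (List Int) :=
  grid.map rowAlt

-- ===== PRECONDITION & SPEC =====
def Spec_transform (grid : List (List Int)) (out : List (List Int)) : Prop := out = transform_alt grid
instance (grid : List (List Int)) (out : List (List Int)) : Decidable (Spec_transform grid out) := by unfold Spec_transform; infer_instance

-- ===== CLAIM (what is proved, stated in full; the proofs are below) =====
def Claim_equal_transform : Prop := ∀ (grid : List (List Int)), Dom_transform grid → Spec_transform grid (transform grid)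

-- ===== LEMMAS AND PROOFS =====

-- the alternating segment written from parity d: c at even offsets, 5 at odd ones
def altFrom (c : Int) : Nat → List Int → List Int
  | _, [] => []
  | d, _ :: l => (if d % 2 = 0 then c else 5) :: altFrom c (d + 1) l

theorem set_append_len (pre : List Int) (v w : Int) (l : List Int) :
    (pre ++ v :: l).set pre.length w = pre ++ w :: l := by
  induction pre with
  | nil => simp
  | cons a pre ih => simp [ih]

theorem fill_go (c : Int) (s : Nat) :
    ∀ (l pre : List Int) (d : Nat), pre.length = s + d →
    (PySem.List.pyRange ((s + d : Nat) : Int) (((s + d) + l.length : Nat) : Int) 1).foldl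
      (fun acc j => acc.set j.toNat (if PySem.Int.mod (j - (s : Int)) 2 == 0 then c else 5))
      (pre ++ l)
    = pre ++ altFrom c d l := by
  intro l
  induction l with
  | nil =>
    intro pre d hp
    rw [PySem.List.pyRange_one_eq_nil (by simp)]
    simp [altFrom]
  | cons v tl ih =>
    intro pre d hp
    have hlt : ((s + d : Nat) : Int) < (((s + d) + (v :: tl).length : Nat) : Int) := by
      simp
    rw [PySem.List.pyRange_one_cons hlt]
    simp only [List.foldl_cons]
    have hmod : PySem.Int.mod (((s + d : Nat) : Int) - (s : Int)) 2 = ((d % 2 : Nat) : Int) := by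
      have h1 : ((s + d : Nat) : Int) - (s : Int) = ((d : Nat) : Int) := by push_cast; ring
      rw [h1, PySem.Int.mod_eq_emod_of_pos (by norm_num)]
      omega
    have htoNat : ((s + d : Nat) : Int).toNat = pre.length := by omega
    set w : Int := if PySem.Int.mod (((s + d : Nat) : Int) - (s : Int)) 2 == 0 then c else 5 with hw
    have hwval : w = if d % 2 = 0 then c else 5 := by
      rw [hw, hmod]
      rcases Nat.mod_two_eq_zero_or_one d with h | h <;> simp [h]
    have hset : (pre ++ v :: tl).set ((s + d : Nat) : Int).toNat w = (pre ++ [w]) ++ tl := by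
      rw [htoNat, set_append_len]; simp
    rw [hset]
    have hp' : (pre ++ [w]).length = s + (d + 1) := by simp; omega
    have := ih (pre ++ [w]) (d + 1) hp'
    have harg1 : ((s + (d + 1) : Nat) : Int) = ((s + d : Nat) : Int) + 1 := by push_cast; ring
    have harg2 : ((s + (d + 1)) + tl.length : Nat) = ((s + d) + (v :: tl).length : Nat) := by
      simp; omega
    rw [harg1, harg2] at this
    rw [this]
    simp [altFrom, hwval]

theorem fillAlt_eq (c : Int) : ∀ (l : List Int) (d : Nat),
    fillAlt l c (d % 2 == 1) = altFrom c d l := by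
  intro l
  induction l with
  | nil => intro d; simp [fillAlt, altFrom]
  | cons v tl ih =>
    intro d
    have hb : (!(d % 2 == 1)) = ((d + 1) % 2 == 1) := by
      rcases Nat.mod_two_eq_zero_or_one d with h | h <;> simp [Nat.add_mod, *]
    have hhead : (if (d % 2 == 1) then (5 : Int) else c) = (if d % 2 = 0 then c else 5) := by
      rcases Nat.mod_two_eq_zero_or_one d with h | h <;> simp [h]
    simp only [fillAlt, altFrom, hb, ih (d + 1), hhead]

theorem findNZ_none_all_zero : ∀ (l : List Int) (i : Nat), findNZ l i = none → ∀ v ∈ l, v = 0 := by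
  intro l
  induction l with
  | nil => intro i _ v hv; cases hv
  | cons a tl ih =>
    intro i h v hv
    by_cases ha : a = 0
    · simp only [findNZ, ha] at h
      rcases List.mem_cons.mp hv with hv | hv
      · rw [hv, ha]
      · exact ih (i + 1) (by simpa using h) v hv
    · simp [findNZ, ha] at h

theorem findNZ_some_split : ∀ (l : List Int) (i s : Nat) (c : Int), findNZ l i = some (s, c) →
    ∃ pre rest, l = pre ++ c :: rest ∧ i + pre.length = s ∧ (∀ v ∈ pre, v = 0) ∧ c ≠ 0 := by
  intro l
  induction l with
  | nil => intro i s c h; simp [findNZ] at h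
  | cons a tl ih =>
    intro i s c h
    by_cases ha : a ≠ 0
    · simp only [findNZ, if_pos ha, Option.some.injEq, Prod.mk.injEq] at h
      exact ⟨[], tl, by simp [h.2], by simp [h.1], by simp, h.2 ▸ ha⟩
    · rw [not_not] at ha
      simp only [findNZ, ha] at h
      obtain ⟨pre, rest, hl, hs, hz, hc⟩ := ih (i + 1) s c (by simpa using h)
      refine ⟨a :: pre, rest, by simp [hl, ha], by simp; omega, ?_, hc⟩
      intro v hv
      rcases List.mem_cons.mp hv with hv | hv
      · rw [hv, ha]
      · exact hz v hv

theorem rowAlt_zeros : ∀ (l : List Int), (∀ v ∈ l, v = 0) → rowAlt l = l := by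
  intro l
  induction l with
  | nil => intro _; rfl
  | cons a tl ih =>
    intro h
    have ha : a = 0 := h a (by simp)
    simp [rowAlt, ha, ih (fun v hv => h v (by simp [hv]))]

theorem rowAlt_split (c : Int) (hc : c ≠ 0) :
    ∀ (pre : List Int), (∀ v ∈ pre, v = 0) → ∀ (rest : List Int),
    rowAlt (pre ++ c :: rest) = pre ++ c :: fillAlt rest c true := by
  intro pre
  induction pre with
  | nil => intro _ rest; simp [rowAlt, hc]
  | cons a pr ih =>
    intro h rest
    have ha : a = 0 := h a (by simp)
    simp only [List.cons_append, rowAlt, ha]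
    simp [ih (fun v hv => h v (by simp [hv])) rest]

theorem row_eq (row : List Int) :
    (match findNZ row 0 with
      | none => row
      | some (s, c) => fillRowA row s c) = rowAlt row := by
  cases h : findNZ row 0 with
  | none => exact (rowAlt_zeros row (findNZ_none_all_zero row 0 h)).symm
  | some sc =>
    obtain ⟨s, c⟩ := sc
    obtain ⟨pre, rest, hl, hs, hz, hc⟩ := findNZ_some_split row 0 s c h
    simp only
    have hs' : pre.length = s := by omega
    have hfill : fillRowA row s c = pre ++ altFrom c 0 (c :: rest) := by
      have hlen : row.length = (s + 0) + (c :: rest).length := by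
        rw [hl]; simp; omega
      unfold fillRowA
      rw [hl] at hlen ⊢
      have := fill_go c s (c :: rest) pre 0 (by omega)
      rw [← hlen] at this
      simpa using this
    rw [hfill, hl, rowAlt_split c hc pre hz rest]
    have : altFrom c 0 (c :: rest) = c :: fillAlt rest c true := by
      have h1 : fillAlt rest c ((1 : Nat) % 2 == 1) = altFrom c 1 rest := fillAlt_eq c rest 1
      simp only [altFrom]
      simp at h1
      simp [h1]
    rw [this]

-- ===== VERDICT (by name: the statement is the Claim_ definition above) =====
theorem transform_spec : Claim_equal_transform := by
  intro grid _
  unfold Spec_transform transform transform_alt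
  exact List.map_congr_left (fun row _ => row_eq row)
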